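-- pv_equiv track=rewrite | github.com/RBenassiUnimore/py_schema_matching | data_integration/local/clusters/__init__.py | refl_transitive_closure
-- ===== SOURCE A (Python) =====
-- def transitive_closure(edges):
--   closure = set(edges)
--   while True:
--     new_relations = set((x, w) for x, y in closure for q, w in closure if q == y)
--     closure_until_now = closure | new_relations  # UNION
--     if closure_until_now == closure:
--       break
--     closure = closure_until_now
--   return closure
--
-- def symmetric_closure(edges):
--   return set([(b, a) for (a, b) in set(edges)])
--
-- def reflexive_closure(nodes):
--   return set([(n, n) for n in nodes])
--
-- def refl_transitive_closure(nodes, edges=None, edges_n0=None, edges_n1=None):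
--   if edges is None:
--     edges = zip(edges_n0, edges_n1)
--   edges = list(edges)  # remove potential iterables
--   edges = edges + [(b, a) for a, b in edges]
--   c = transitive_closure(edges)
--   c.update(symmetric_closure(c))
--   c.update(reflexive_closure(nodes))
--   return c
-- ===== SOURCE B (Python) =====
-- def refl_transitive_closure(nodes, edges=None, edges_n0=None, edges_n1=None):
--     if edges is None:
--         edges = zip(edges_n0, edges_n1)
--     # partition the edge endpoints into connected components by merging per edge
--     comps = []
--     for a, b in edges:
--         touched = [c for c in comps if a in c or b in c]
--         untouched = [c for c in comps if not (a in c or b in c)]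
--         merged = [v for c in touched for v in c]
--         if a not in merged:
--             merged.append(a)
--         if b not in merged:
--             merged.append(b)
--         comps = untouched + [merged]
--     out = set()
--     for c in comps:
--         for x in c:
--             for y in c:
--                 out.add((x, y))
--     for n in nodes:
--         out.add((n, n))
--     return out
-- ===== Notes on version B (the rewrite author's own statement) =====
-- stated objective: faster
-- what changed: Replaces the iterate-relational-composition-to-fixpoint loop (plus the posterior symmetric closure pass) by a single pass that merges edge endpoints into connected components and then emits every ordered pair inside each component plus the reflexive pairs of nodes.
import Mathlib
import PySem

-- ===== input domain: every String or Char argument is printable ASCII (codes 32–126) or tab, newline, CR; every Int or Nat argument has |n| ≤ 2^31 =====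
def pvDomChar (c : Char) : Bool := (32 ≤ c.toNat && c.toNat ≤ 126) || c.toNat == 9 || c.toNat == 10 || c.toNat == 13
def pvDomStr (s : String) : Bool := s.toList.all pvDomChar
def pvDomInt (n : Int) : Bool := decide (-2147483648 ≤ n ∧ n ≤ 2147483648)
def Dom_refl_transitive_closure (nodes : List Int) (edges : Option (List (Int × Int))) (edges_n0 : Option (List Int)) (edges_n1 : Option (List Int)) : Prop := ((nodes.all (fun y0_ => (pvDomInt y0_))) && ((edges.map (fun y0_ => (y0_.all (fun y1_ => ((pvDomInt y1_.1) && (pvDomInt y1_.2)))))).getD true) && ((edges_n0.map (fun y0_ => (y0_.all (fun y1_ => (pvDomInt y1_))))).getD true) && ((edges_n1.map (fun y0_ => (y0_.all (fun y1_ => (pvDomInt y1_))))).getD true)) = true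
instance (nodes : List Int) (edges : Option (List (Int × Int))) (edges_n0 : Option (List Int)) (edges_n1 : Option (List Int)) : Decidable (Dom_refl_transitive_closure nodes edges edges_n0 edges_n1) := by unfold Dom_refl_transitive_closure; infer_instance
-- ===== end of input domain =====

-- B replaces A's iterate-relational-composition-to-fixpoint closure by a one-pass merge of edge
-- endpoints into connected components (objective: faster). Both Pythons return an (unordered) set;
-- both ports render that set value canonically sorted, so only set membership is at stake.

-- ===== PORT A =====
-- [(b, a) for a, b in edges]
def pvSwapAll (l : List (Int × Int)) : List (Int × Int) := l.map (fun p => (p.2, p.1))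

-- set((x, w) for x, y in closure for q, w in closure if q == y)
def pvNewRels (closure : List (Int × Int)) : List (Int × Int) :=
  closure.flatMap (fun xy => closure.filterMap (fun qw => if qw.1 = xy.2 then some (xy.1, qw.2) else none))

lemma mem_pvNewRels (closure : List (Int × Int)) (p : Int × Int) :
    p ∈ pvNewRels closure ↔ ∃ xy ∈ closure, ∃ qw ∈ closure, qw.1 = xy.2 ∧ p = (xy.1, qw.2) := by
  simp only [pvNewRels, List.mem_flatMap, List.mem_filterMap]
  constructor
  · rintro ⟨xy, hxy, qw, hqw, h⟩
    split at h
    · exact ⟨xy, hxy, qw, hqw, by assumption, (Option.some_inj.1 h).symm⟩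
    · exact absurd h (by simp)
  · rintro ⟨xy, hxy, qw, hqw, h1, h2⟩
    exact ⟨xy, hxy, qw, hqw, by simp [h1, h2]⟩

-- the elements the loop body adds (closure_until_now minus closure); the loop stops when there are
-- none, which is exactly Python's 'closure_until_now == closure' test since closure ⊆ closure_until_now
def pvFresh (closure : List (Int × Int)) : List (Int × Int) :=
  (PySem.List.dedup (pvNewRels closure)).filter (fun p => decide (p ∉ closure))

lemma mem_pvFresh {closure : List (Int × Int)} {p : Int × Int} :
    p ∈ pvFresh closure ↔ p ∈ pvNewRels closure ∧ p ∉ closure := by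
  simp [pvFresh, List.mem_filter]

lemma pvFresh_append_nodup {closure : List (Int × Int)} (h : closure.Nodup) :
    (closure ++ pvFresh closure).Nodup :=
  h.append (List.Nodup.filter _ (PySem.List.nodup_dedup _))
    (fun _ hx hx2 => (mem_pvFresh.1 hx2).2 hx)

lemma pvFresh_append_sub {V : Finset Int} {closure : List (Int × Int)}
    (hsub : ∀ p ∈ closure, p.1 ∈ V ∧ p.2 ∈ V) :
    ∀ p ∈ closure ++ pvFresh closure, p.1 ∈ V ∧ p.2 ∈ V := by
  intro p hp
  rcases List.mem_append.1 hp with h | h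
  · exact hsub p h
  · rcases (mem_pvNewRels closure p).1 (mem_pvFresh.1 h).1 with ⟨xy, hxy, qw, hqw, _, rfl⟩
    exact ⟨(hsub xy hxy).1, (hsub qw hqw).2⟩

-- the closure only ever holds pairs over V, which bounds its size (justifies termination below)
lemma pvPairs_length_le (V : Finset Int) (l : List (Int × Int)) (hnd : l.Nodup)
    (hsub : ∀ p ∈ l, p.1 ∈ V ∧ p.2 ∈ V) : l.length ≤ V.card * V.card := by
  have h1 : l.toFinset ⊆ V ×ˢ V := by
    intro p hp
    rw [List.mem_toFinset] at hp
    rw [Finset.mem_product]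
    exact hsub p hp
  calc l.length = l.toFinset.card := (List.toFinset_card_of_nodup hnd).symm
    _ ≤ (V ×ˢ V).card := Finset.card_le_card h1
    _ = V.card * V.card := Finset.card_product V V

-- the 'while True' loop of transitive_closure; the invariant arguments only justify termination
def pvTCLoop (V : Finset Int) (closure : List (Int × Int)) (hnd : closure.Nodup)
    (hsub : ∀ p ∈ closure, p.1 ∈ V ∧ p.2 ∈ V) : List (Int × Int) :=
  if hf : pvFresh closure = [] then closure
  else pvTCLoop V (closure ++ pvFresh closure) (pvFresh_append_nodup hnd) (pvFresh_append_sub hsub)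
termination_by V.card * V.card + 1 - closure.length
decreasing_by
  have hb := pvPairs_length_le V _ (pvFresh_append_nodup hnd) (pvFresh_append_sub hsub)
  have hne : (pvFresh closure).length ≠ 0 := by simpa [List.length_eq_zero_iff] using hf
  simp only [List.length_append] at hb ⊢
  omega

def pv_transitive_closure (edges : List (Int × Int)) : List (Int × Int) :=
  pvTCLoop ((edges.map Prod.fst ++ edges.map Prod.snd).toFinset) (PySem.List.dedup edges)
    (PySem.List.nodup_dedup edges)
    (by
      intro p hp
      rw [PySem.List.mem_dedup] at hp
      constructor
      · simp only [List.mem_toFinset, List.mem_append, List.mem_map]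
        exact Or.inl ⟨p, hp, rfl⟩
      · simp only [List.mem_toFinset, List.mem_append, List.mem_map]
        exact Or.inr ⟨p, hp, rfl⟩)

def pv_symmetric_closure (c : List (Int × Int)) : List (Int × Int) :=
  PySem.List.dedup (pvSwapAll (PySem.List.dedup c))

def pv_reflexive_closure (nodes : List Int) : List (Int × Int) :=
  PySem.List.dedup (nodes.map (fun n => (n, n)))

-- shared canonical rendering of the returned Python set (which is unordered): sort lexicographically
def pairLE (p q : Int × Int) : Bool := decide (p.1 < q.1 ∨ (p.1 = q.1 ∧ p.2 ≤ q.2))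
def pvSortPairs (l : List (Int × Int)) : List (Int × Int) := l.mergeSort pairLE

-- shared: 'if edges is None: edges = zip(edges_n0, edges_n1)' (a None operand raises TypeError; Pre_ excludes that)
def pvEdgesArg (edges : Option (List (Int × Int))) (edges_n0 : Option (List Int)) (edges_n1 : Option (List Int)) : List (Int × Int) :=
  match edges with
  | some es => es
  | none => (edges_n0.getD []).zip (edges_n1.getD [])

def refl_transitive_closure (nodes : List Int) (edges : Option (List (Int × Int))) (edges_n0 : Option (List Int)) (edges_n1 : Option (List Int)) : List (Int × Int) :=
  let es0 := pvEdgesArg edges edges_n0 edges_n1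
  let es := es0 ++ pvSwapAll es0
  let c := pv_transitive_closure es
  let c2 := PySem.Set.update c (pv_symmetric_closure c)
  let c3 := PySem.Set.update c2 (pv_reflexive_closure nodes)
  pvSortPairs c3

-- ===== PORT B =====
-- one loop body of Source B: split off the components touching either endpoint, merge them, add missing endpoints
def pvMergeStep (comps : List (List Int)) (e : Int × Int) : List (List Int) :=
  let touched := comps.filter (fun c => decide (e.1 ∈ c ∨ e.2 ∈ c))
  let untouched := comps.filter (fun c => decide (¬ (e.1 ∈ c ∨ e.2 ∈ c)))
  let m0 := touched.flatMap id
  let m1 := if e.1 ∈ m0 then m0 else m0 ++ [e.1]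
  let m2 := if e.2 ∈ m1 then m1 else m1 ++ [e.2]
  untouched ++ [m2]

def refl_transitive_closure_alt (nodes : List Int) (edges : Option (List (Int × Int))) (edges_n0 : Option (List Int)) (edges_n1 : Option (List Int)) : List (Int × Int) :=
  let es := pvEdgesArg edges edges_n0 edges_n1
  let comps := es.foldl pvMergeStep []
  let pairs := comps.flatMap (fun c => c.flatMap (fun x => c.map (fun y => (x, y))))
  let out := PySem.Set.update (PySem.Set.ofList pairs) (nodes.map (fun n => (n, n)))
  pvSortPairs out

-- ===== PRECONDITION & SPEC =====
-- Pre_ excludes only the inputs on which A raises: edges None together with a None edges_n0/edges_n1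
-- makes zip(edges_n0, edges_n1) raise TypeError (B raises there too).
def Pre_refl_transitive_closure (nodes : List Int) (edges : Option (List (Int × Int))) (edges_n0 : Option (List Int)) (edges_n1 : Option (List Int)) : Prop :=
  edges ≠ none ∨ (edges_n0 ≠ none ∧ edges_n1 ≠ none)
instance (nodes : List Int) (edges : Option (List (Int × Int))) (edges_n0 : Option (List Int)) (edges_n1 : Option (List Int)) : Decidable (Pre_refl_transitive_closure nodes edges edges_n0 edges_n1) := by unfold Pre_refl_transitive_closure; infer_instance

def pvWitness_refl_transitive_closure : List Int × (Option (List (Int × Int))) × Option (List Int) × Option (List Int) :=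
  ([1, 2], some [(1, 2), (3, 3)], none, none)

def Spec_refl_transitive_closure (nodes : List Int) (edges : Option (List (Int × Int))) (edges_n0 : Option (List Int)) (edges_n1 : Option (List Int)) (out : List (Int × Int)) : Prop := out = refl_transitive_closure_alt nodes edges edges_n0 edges_n1
instance (nodes : List Int) (edges : Option (List (Int × Int))) (edges_n0 : Option (List Int)) (edges_n1 : Option (List Int)) (out : List (Int × Int)) : Decidable (Spec_refl_transitive_closure nodes edges edges_n0 edges_n1 out) := by unfold Spec_refl_transitive_closure; infer_instance

-- ===== CLAIM (what is proved, stated in full; the proofs are below) =====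
def Claim_equal_refl_transitive_closure : Prop := ∀ (nodes : List Int) (edges : Option (List (Int × Int))) (edges_n0 : Option (List Int)) (edges_n1 : Option (List Int)), Dom_refl_transitive_closure nodes edges edges_n0 edges_n1 → Pre_refl_transitive_closure nodes edges edges_n0 edges_n1 → Spec_refl_transitive_closure nodes edges edges_n0 edges_n1 (refl_transitive_closure nodes edges edges_n0 edges_n1)

-- ===== LEMMAS AND PROOFS =====

-- a set of pairs closed under relational composition
def pvClosedP (T : Int × Int → Prop) : Prop := ∀ p q, T p → T q → q.1 = p.2 → T (p.1, q.2)

lemma pvSortPairs_eq_of_mem {l1 l2 : List (Int × Int)} (h1 : l1.Nodup) (h2 : l2.Nodup)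
    (h : ∀ p, p ∈ l1 ↔ p ∈ l2) : pvSortPairs l1 = pvSortPairs l2 := by
  have hperm : (l1.mergeSort pairLE).Perm (l2.mergeSort pairLE) :=
    ((l1.mergeSort_perm pairLE).trans ((List.perm_ext_iff_of_nodup h1 h2).2 h)).trans
      (l2.mergeSort_perm pairLE).symm
  have htrans : ∀ a b c : Int × Int, pairLE a b = true → pairLE b c = true → pairLE a c = true := by
    intro a b c hab hbc
    simp only [pairLE, decide_eq_true_eq] at *
    omega
  have htotal : ∀ a b : Int × Int, (pairLE a b || pairLE b a) = true := by
    intro a b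
    simp only [pairLE, Bool.or_eq_true, decide_eq_true_eq]
    omega
  have hs1 := List.sorted_mergeSort htrans htotal l1
  have hs2 := List.sorted_mergeSort htrans htotal l2
  exact List.eq_of_perm_of_sorted
    (fun a b _ _ hab hba => by
      simp only [pairLE, decide_eq_true_eq] at hab hba
      have h1 : a.1 = b.1 := by omega
      have h2 : a.2 = b.2 := by omega
      exact Prod.ext h1 h2)
    hs1 hs2 hperm

-- ----- facts about A's closure loop -----

lemma pvTCLoop_subset (V : Finset Int) (closure : List (Int × Int)) (hnd : closure.Nodup)
    (hsub : ∀ p ∈ closure, p.1 ∈ V ∧ p.2 ∈ V) :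
    ∀ p ∈ closure, p ∈ pvTCLoop V closure hnd hsub := by
  fun_induction pvTCLoop with
  | case1 closure hnd hsub hf => exact fun p hp => hp
  | case2 closure hnd hsub hf ih => exact fun p hp => ih p (List.mem_append_left _ hp)

lemma pvTCLoop_closed (V : Finset Int) (closure : List (Int × Int)) (hnd : closure.Nodup)
    (hsub : ∀ p ∈ closure, p.1 ∈ V ∧ p.2 ∈ V) :
    pvClosedP (· ∈ pvTCLoop V closure hnd hsub) := by
  fun_induction pvTCLoop with
  | case1 closure hnd hsub hf =>
    intro p q hp hq hqp
    by_cases hin : (p.1, q.2) ∈ closure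
    · exact hin
    · exact absurd (mem_pvFresh.2 ⟨(mem_pvNewRels closure _).2 ⟨p, hp, q, hq, hqp, rfl⟩, hin⟩)
        (by simp [hf])
  | case2 closure hnd hsub hf ih => exact ih

lemma pvTCLoop_min (V : Finset Int) (closure : List (Int × Int)) (hnd : closure.Nodup)
    (hsub : ∀ p ∈ closure, p.1 ∈ V ∧ p.2 ∈ V) (T : Int × Int → Prop) (hT : pvClosedP T) :
    (∀ p ∈ closure, T p) → ∀ p ∈ pvTCLoop V closure hnd hsub, T p := by
  fun_induction pvTCLoop with
  | case1 closure hnd hsub hf => exact fun hbase => hbase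
  | case2 closure hnd hsub hf ih =>
    intro hbase
    apply ih
    intro p hp
    rcases List.mem_append.1 hp with h | h
    · exact hbase p h
    · rcases (mem_pvNewRels closure p).1 (mem_pvFresh.1 h).1 with ⟨xy, hxy, qw, hqw, hh, rfl⟩
      exact hT xy qw (hbase xy hxy) (hbase qw hqw) hh

lemma pvTCLoop_nodup (V : Finset Int) (closure : List (Int × Int)) (hnd : closure.Nodup)
    (hsub : ∀ p ∈ closure, p.1 ∈ V ∧ p.2 ∈ V) : (pvTCLoop V closure hnd hsub).Nodup := by
  fun_induction pvTCLoop with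
  | case1 closure hnd hsub hf => exact hnd
  | case2 closure hnd hsub hf ih => exact ih

-- ----- facts about B's component merging -----

def pvSameComp (comps : List (List Int)) (x y : Int) : Prop := ∃ c, c ∈ comps ∧ x ∈ c ∧ y ∈ c

def pvDisj (comps : List (List Int)) : Prop :=
  List.Pairwise (fun c d => ∀ v, v ∈ c → v ∉ d) comps

-- the merged component of one step, named for the proofs (definitionally the m2 of pvMergeStep)
def pvMerged (comps : List (List Int)) (e : Int × Int) : List Int :=
  let m0 := (comps.filter (fun c => decide (e.1 ∈ c ∨ e.2 ∈ c))).flatMap id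
  let m1 := if e.1 ∈ m0 then m0 else m0 ++ [e.1]
  if e.2 ∈ m1 then m1 else m1 ++ [e.2]

lemma pvMergeStep_eq (comps : List (List Int)) (e : Int × Int) :
    pvMergeStep comps e =
      comps.filter (fun c => decide (¬ (e.1 ∈ c ∨ e.2 ∈ c))) ++ [pvMerged comps e] := rfl

lemma mem_pvMerged {comps : List (List Int)} {e : Int × Int} {v : Int} :
    v ∈ pvMerged comps e ↔
      (∃ c ∈ comps, (e.1 ∈ c ∨ e.2 ∈ c) ∧ v ∈ c) ∨ v = e.1 ∨ v = e.2 := by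
  have hm0 : ∀ w, (w ∈ (comps.filter (fun c => decide (e.1 ∈ c ∨ e.2 ∈ c))).flatMap id ↔
      ∃ c ∈ comps, (e.1 ∈ c ∨ e.2 ∈ c) ∧ w ∈ c) := by
    intro w
    simp only [List.mem_flatMap, List.mem_filter, id_eq, decide_eq_true_eq]
    constructor
    · rintro ⟨a, ⟨g1, g2⟩, g3⟩
      exact ⟨a, g1, g2, g3⟩
    · rintro ⟨a, g1, g2, g3⟩
      exact ⟨a, ⟨g1, g2⟩, g3⟩
  simp only [pvMerged]
  split_ifs with h1 h2 h2
  · constructor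
    · intro h
      exact Or.inl ((hm0 v).1 h)
    · rintro (h | rfl | rfl)
      · exact (hm0 v).2 h
      · exact h1
      · exact h2
  · rw [List.mem_append, List.mem_singleton]
    constructor
    · rintro (h | rfl)
      · exact Or.inl ((hm0 v).1 h)
      · exact Or.inr (Or.inr rfl)
    · rintro (h | rfl | rfl)
      · exact Or.inl ((hm0 v).2 h)
      · exact Or.inl h1
      · exact Or.inr rfl
  · rw [List.mem_append, List.mem_singleton] at h2 ⊢
    constructor
    · rintro (h | rfl)
      · exact Or.inl ((hm0 v).1 h)
      · exact Or.inr (Or.inl rfl)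
    · rintro (h | rfl | rfl)
      · exact Or.inl ((hm0 v).2 h)
      · exact Or.inr rfl
      · rcases h2 with h | heq
        · exact Or.inl h
        · exact Or.inr heq
  · rw [List.mem_append, List.mem_append, List.mem_singleton, List.mem_singleton]
    constructor
    · rintro ((h | rfl) | rfl)
      · exact Or.inl ((hm0 v).1 h)
      · exact Or.inr (Or.inl rfl)
      · exact Or.inr (Or.inr rfl)
    · rintro (h | rfl | rfl)
      · exact Or.inl (Or.inl ((hm0 v).2 h))
      · exact Or.inl (Or.inr rfl)
      · exact Or.inr rfl

lemma pvMergeStep_mono {comps : List (List Int)} {e : Int × Int} {x y : Int}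
    (h : pvSameComp comps x y) : pvSameComp (pvMergeStep comps e) x y := by
  rcases h with ⟨c, hc, hx, hy⟩
  rw [pvMergeStep_eq]
  by_cases ht : e.1 ∈ c ∨ e.2 ∈ c
  · refine ⟨pvMerged comps e, List.mem_append_right _ (List.mem_singleton_self _), ?_, ?_⟩
    · exact mem_pvMerged.2 (Or.inl ⟨c, hc, ht, hx⟩)
    · exact mem_pvMerged.2 (Or.inl ⟨c, hc, ht, hy⟩)
  · exact ⟨c, List.mem_append_left _ (List.mem_filter.2 ⟨hc, by simpa using ht⟩), hx, hy⟩

lemma pvMergeStep_edge (comps : List (List Int)) (e : Int × Int) :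
    pvSameComp (pvMergeStep comps e) e.1 e.2 := by
  rw [pvMergeStep_eq]
  exact ⟨pvMerged comps e, List.mem_append_right _ (List.mem_singleton_self _),
    mem_pvMerged.2 (Or.inr (Or.inl rfl)), mem_pvMerged.2 (Or.inr (Or.inr rfl))⟩

lemma pvMergeStep_disj {comps : List (List Int)} (e : Int × Int) (h : pvDisj comps) :
    pvDisj (pvMergeStep comps e) := by
  have hsymm : Symmetric (fun c d : List Int => ∀ v, v ∈ c → v ∉ d) :=
    fun a b hab v hv hv' => hab v hv' hv
  rw [pvMergeStep_eq]
  rw [pvDisj, List.pairwise_append]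
  refine ⟨h.sublist List.filter_sublist, List.pairwise_singleton _ _, ?_⟩
  intro c hc d hd v hvc hvd
  rw [List.mem_singleton] at hd
  subst hd
  rcases List.mem_filter.1 hc with ⟨hcm, hcp⟩
  have hcnt : ¬ (e.1 ∈ c ∨ e.2 ∈ c) := by simpa using hcp
  rcases mem_pvMerged.1 hvd with ⟨c', hc', ht', hv'⟩ | rfl | rfl
  · have hne : c ≠ c' := fun hh => hcnt (hh ▸ ht')
    exact (List.Pairwise.forall hsymm h hcm hc' hne) v hvc hv'
  · exact hcnt (Or.inl hvc)
  · exact hcnt (Or.inr hvc)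

lemma pvMergeStep_just {comps : List (List Int)} {e : Int × Int} {T : Int × Int → Prop}
    (hT : pvClosedP T) (hsym : ∀ p, T p → T (p.2, p.1)) (he : T e)
    (hc : ∀ c ∈ comps, ∀ x ∈ c, ∀ y ∈ c, T (x, y)) :
    ∀ c ∈ pvMergeStep comps e, ∀ x ∈ c, ∀ y ∈ c, T (x, y) := by
  have heab : T (e.1, e.2) := by simpa using he
  have heba : T (e.2, e.1) := hsym e he
  have key : ∀ v ∈ pvMerged comps e, T (e.1, v) := by
    intro v hv
    rcases mem_pvMerged.1 hv with ⟨c', hc', ht', hv'⟩ | rfl | rfl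
    · rcases ht' with h1 | h1
      · exact hc c' hc' e.1 h1 v hv'
      · exact hT (e.1, e.2) (e.2, v) heab (hc c' hc' e.2 h1 v hv') rfl
    · exact hT (e.1, e.2) (e.2, e.1) heab heba rfl
    · exact heab
  intro c hcm x hx y hy
  rw [pvMergeStep_eq] at hcm
  rcases List.mem_append.1 hcm with hcm | hcm
  · exact hc c (List.mem_filter.1 hcm).1 x hx y hy
  · rw [List.mem_singleton] at hcm
    subst hcm
    have hxa : T (x, e.1) := hsym (e.1, x) (key x hx)
    exact hT (x, e.1) (e.1, y) hxa (key y hy) rfl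

lemma pvFold_mono {es : List (Int × Int)} {comps : List (List Int)} {x y : Int}
    (h : pvSameComp comps x y) : pvSameComp (es.foldl pvMergeStep comps) x y := by
  induction es generalizing comps with
  | nil => exact h
  | cons e es ih =>
    rw [List.foldl_cons]
    exact ih (pvMergeStep_mono h)

lemma pvFold_edge {es : List (Int × Int)} {comps : List (List Int)} {e : Int × Int}
    (h : e ∈ es) : pvSameComp (es.foldl pvMergeStep comps) e.1 e.2 := by
  induction es generalizing comps with
  | nil => cases h
  | cons e' es ih =>
    rw [List.foldl_cons]
    rcases List.mem_cons.1 h with rfl | h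
    · exact pvFold_mono (pvMergeStep_edge comps e)
    · exact ih h

lemma pvFold_disj (es : List (Int × Int)) (comps : List (List Int)) (h : pvDisj comps) :
    pvDisj (es.foldl pvMergeStep comps) := by
  induction es generalizing comps with
  | nil => exact h
  | cons e es ih =>
    rw [List.foldl_cons]
    exact ih _ (pvMergeStep_disj e h)

lemma pvFold_just {es : List (Int × Int)} {T : Int × Int → Prop} {comps : List (List Int)}
    (hT : pvClosedP T) (hsym : ∀ p, T p → T (p.2, p.1)) (he : ∀ e ∈ es, T e)
    (hc : ∀ c ∈ comps, ∀ x ∈ c, ∀ y ∈ c, T (x, y)) :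
    ∀ c ∈ es.foldl pvMergeStep comps, ∀ x ∈ c, ∀ y ∈ c, T (x, y) := by
  induction es generalizing comps with
  | nil => exact hc
  | cons e es ih =>
    rw [List.foldl_cons]
    exact ih (fun e' he' => he e' (List.mem_cons_of_mem _ he'))
      (pvMergeStep_just hT hsym (he e List.mem_cons_self) hc)

lemma pvSameComp_trans {comps : List (List Int)} (hd : pvDisj comps) {x y z : Int}
    (h1 : pvSameComp comps x y) (h2 : pvSameComp comps y z) : pvSameComp comps x z := by
  rcases h1 with ⟨c, hc, hx, hy⟩
  rcases h2 with ⟨d, hd', hy', hz⟩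
  by_cases hcd : c = d
  · exact ⟨c, hc, hx, hcd ▸ hz⟩
  · have hsymm : Symmetric (fun c d : List Int => ∀ v, v ∈ c → v ∉ d) := by
      intro a b hab v hv hv'
      exact hab v hv' hv
    exact absurd hy' ((List.Pairwise.forall hsymm hd hc hd' hcd) y hy)

-- ----- main equivalence -----

lemma pv_core (nodes : List Int) (es0 : List (Int × Int)) :
    pvSortPairs (PySem.Set.update
      (PySem.Set.update (pv_transitive_closure (es0 ++ pvSwapAll es0))
        (pv_symmetric_closure (pv_transitive_closure (es0 ++ pvSwapAll es0))))
      (pv_reflexive_closure nodes)) =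
    pvSortPairs (PySem.Set.update
      (PySem.Set.ofList ((es0.foldl pvMergeStep []).flatMap
        (fun c => c.flatMap (fun x => c.map (fun y => (x, y))))))
      (nodes.map (fun n => (n, n)))) := by
  set es := es0 ++ pvSwapAll es0 with hes
  set c := pv_transitive_closure es with hc
  set comps := es0.foldl pvMergeStep [] with hcomps
  have hcnodup : c.Nodup := pvTCLoop_nodup _ _ _ _
  have hes_c : ∀ p ∈ es, p ∈ c := fun p hp =>
    pvTCLoop_subset _ _ _ _ p ((PySem.List.mem_dedup es p).2 hp)
  have hclosed : pvClosedP (· ∈ c) := pvTCLoop_closed _ _ _ _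
  have hmin : ∀ (T : Int × Int → Prop), pvClosedP T → (∀ p ∈ es, T p) → ∀ p ∈ c, T p := by
    intro T hT hb
    exact pvTCLoop_min _ _ _ _ T hT (fun p hp => hb p ((PySem.List.mem_dedup es p).1 hp))
  have hswap_mem : ∀ p : Int × Int, p ∈ es → (p.2, p.1) ∈ es := by
    intro p hp
    rcases List.mem_append.1 hp with h | h
    · exact List.mem_append_right _ (List.mem_map.2 ⟨p, h, rfl⟩)
    · rcases List.mem_map.1 h with ⟨q, hq, rfl⟩
      rw [Prod.mk.eta]
      exact List.mem_append_left (pvSwapAll es0) hq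
  have hcsymm : ∀ p ∈ c, (p.2, p.1) ∈ c := by
    apply hmin (fun p => (p.2, p.1) ∈ c)
    · intro p q hp hq hqp
      exact hclosed (q.2, q.1) (p.2, p.1) hq hp (by simpa using hqp.symm)
    · intro p hp
      exact hes_c _ (hswap_mem p hp)
  have hdisj : pvDisj comps := pvFold_disj es0 [] List.Pairwise.nil
  have h1 : ∀ p ∈ c, pvSameComp comps p.1 p.2 := by
    apply hmin (fun p => pvSameComp comps p.1 p.2)
    · intro p q hp hq hqp
      rw [hqp] at hq
      exact pvSameComp_trans hdisj hp hq
    · intro p hp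
      rcases List.mem_append.1 hp with h | h
      · exact pvFold_edge h
      · rcases List.mem_map.1 h with ⟨q, hq, rfl⟩
        rcases pvFold_edge (comps := ([] : List (List Int))) hq with ⟨cc, hcc, hq1, hq2⟩
        exact ⟨cc, hcc, hq2, hq1⟩
  have h2 : ∀ x y : Int, pvSameComp comps x y → (x, y) ∈ c := by
    intro x y hs
    rcases hs with ⟨cc, hcc, hx, hy⟩
    exact pvFold_just hclosed (fun p hp => hcsymm p hp)
      (fun e he => hes_c e (List.mem_append_left _ he))
      (by intro c hc; cases hc) cc hcc x hx y hy
  apply pvSortPairs_eq_of_mem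
  · exact PySem.Set.nodup_update _ _ (PySem.Set.nodup_update _ _ hcnodup)
  · exact PySem.Set.nodup_update _ _ (PySem.Set.nodup_ofList _)
  · intro p
    rw [PySem.Set.mem_update, PySem.Set.mem_update, PySem.Set.mem_update, PySem.Set.mem_ofList]
    have hsymc : p ∈ pv_symmetric_closure c ↔ p ∈ c := by
      simp only [pv_symmetric_closure, PySem.List.mem_dedup, pvSwapAll, List.mem_map]
      constructor
      · rintro ⟨r, hr, rfl⟩
        exact hcsymm r hr
      · intro hq
        exact ⟨(p.2, p.1), hcsymm p hq, by simp⟩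
    have hrefl : p ∈ pv_reflexive_closure nodes ↔ (p.1 = p.2 ∧ p.1 ∈ nodes) := by
      simp only [pv_reflexive_closure, PySem.List.mem_dedup, List.mem_map]
      constructor
      · rintro ⟨n, hn, rfl⟩
        exact ⟨rfl, hn⟩
      · rintro ⟨hpq, hn⟩
        exact ⟨p.1, hn, by rw [Prod.ext_iff]; exact ⟨rfl, hpq⟩⟩
    have hdiag : p ∈ nodes.map (fun n => (n, n)) ↔ (p.1 = p.2 ∧ p.1 ∈ nodes) := by
      simp only [List.mem_map]
      constructor
      · rintro ⟨n, hn, rfl⟩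
        exact ⟨rfl, hn⟩
      · rintro ⟨hpq, hn⟩
        exact ⟨p.1, hn, by rw [Prod.ext_iff]; exact ⟨rfl, hpq⟩⟩
    have hpairs : p ∈ comps.flatMap (fun cc => cc.flatMap (fun x => cc.map (fun y => (x, y)))) ↔
        pvSameComp comps p.1 p.2 := by
      simp only [List.mem_flatMap, List.mem_map, pvSameComp]
      constructor
      · rintro ⟨cc, hcc, x, hx, y, hy, rfl⟩
        exact ⟨cc, hcc, hx, hy⟩
      · rintro ⟨cc, hcc, hx, hy⟩
        exact ⟨cc, hcc, p.1, hx, p.2, hy, by simp⟩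
    rw [hsymc, hrefl, hdiag, hpairs]
    constructor
    · rintro ((h | h) | h)
      · exact Or.inl (h1 p h)
      · exact Or.inl (h1 p h)
      · exact Or.inr h
    · rintro (h | h)
      · exact Or.inl (Or.inl (by simpa using h2 p.1 p.2 h))
      · exact Or.inr h

-- ===== VERDICT (by name: the statement is the Claim_ definition above) =====
theorem refl_transitive_closure_spec : Claim_equal_refl_transitive_closure := by
  intro nodes edges edges_n0 edges_n1 _ _
  exact pv_core nodes (pvEdgesArg edges edges_n0 edges_n1)
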